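-- pv_equiv track=rewrite | github.com/bakunobu/exercise | 1400_basic_tasks/chap_6/6_45.py | max_indexing
-- ===== SOURCE A (Python) =====
-- def max_indexing(n:int) -> tuple:
--     i = 0
--     md = 0
--     mdi = 0
--     while n:
--         num = n % 10
--         if num > md:
--             md = num
--             mdi = i
--         n //= 10
--         i += 1
--     return(mdi, i - 1 - mdi)
-- ===== SOURCE B (Python) =====
-- def max_indexing(n: int) -> tuple:
--     digits = []
--     while n > 0:
--         digits.append(n % 10)
--         n //= 10
--     if not digits:
--         return (0, -1)
--     md = max(digits)
--     mdi = digits.index(md)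
--     return (mdi, len(digits) - 1 - mdi)
-- ===== Notes on version B (the rewrite author's own statement) =====
-- stated objective: alternative
-- what changed: B first materialises the digit list (right-to-left), then finds the max digit with max() and its first (rightmost) index with list.index, instead of A's fused single-pass running-max loop; Pre_ excludes n < 0, on which A loops forever (n //= 10 sticks at -1).
import Mathlib
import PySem

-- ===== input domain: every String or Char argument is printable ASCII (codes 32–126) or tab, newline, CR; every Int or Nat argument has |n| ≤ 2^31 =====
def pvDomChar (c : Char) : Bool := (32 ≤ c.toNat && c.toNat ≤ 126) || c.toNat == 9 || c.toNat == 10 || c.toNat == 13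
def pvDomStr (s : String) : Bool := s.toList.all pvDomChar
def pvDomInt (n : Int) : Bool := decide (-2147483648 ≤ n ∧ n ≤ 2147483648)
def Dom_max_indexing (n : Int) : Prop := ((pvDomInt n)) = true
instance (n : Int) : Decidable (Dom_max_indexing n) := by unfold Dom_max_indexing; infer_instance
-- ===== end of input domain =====

-- B finds the max digit via max()/list.index over the materialised digit list instead of
-- A's fused running-max loop (objective: alternative decomposition, same cost).

-- termination measure fact for both digit loops
theorem pvFloordivTen_lt (n : Int) (h : 0 < n) :
    (PySem.Int.floordiv n 10).toNat < n.toNat := by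
  have h1 : 0 ≤ PySem.Int.floordiv n 10 :=
    (PySem.Int.le_floordiv_iff_mul_le (a := n) (b := 10) (q := 0) (by norm_num)).2 (by omega)
  have h2 : PySem.Int.floordiv n 10 < n :=
    (PySem.Int.floordiv_lt_iff_lt_mul (a := n) (b := 10) (q := n) (by norm_num)).2 (by omega)
  omega

-- ===== PORT A =====
-- A's `while n:` loop; the loop only ever runs with n > 0 inside Pre_ (on n < 0 the
-- Python loop never terminates, excluded by Pre_), so the guard `0 < n` makes it total.
def maxILoop (n i md mdi : Int) : Int × Int :=
  if h : 0 < n then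
    let num := PySem.Int.mod n 10
    if num > md then
      maxILoop (PySem.Int.floordiv n 10) (i + 1) num i
    else
      maxILoop (PySem.Int.floordiv n 10) (i + 1) md mdi
  else (mdi, i - 1 - mdi)
termination_by n.toNat
decreasing_by all_goals exact pvFloordivTen_lt n h

def max_indexing (n : Int) : Int × Int := maxILoop n 0 0 0

-- ===== PORT B =====
-- Source B's digit-collection loop `while n > 0: digits.append(n % 10); n //= 10`
def pyDigits (n : Int) : List Int :=
  if h : 0 < n then
    PySem.Int.mod n 10 :: pyDigits (PySem.Int.floordiv n 10)
  else []
termination_by n.toNat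
decreasing_by exact pvFloordivTen_lt n h

def max_indexing_alt (n : Int) : Int × Int :=
  let digits := pyDigits n
  if digits = [] then (0, -1)
  else
    let md : Int := (PySem.List.max? digits (fun x => x)).getD 0       -- max(digits); list nonempty here
    let mdi : Nat := (PySem.List.index? digits md).getD 0              -- digits.index(md); md ∈ digits here
    ((mdi : Int), (digits.length : Int) - 1 - (mdi : Int))

-- ===== PRECONDITION & SPEC =====
-- Pre_ excludes n < 0, on which Python A never returns (the `while n:` loop sticks at n = -1).
def Pre_max_indexing (n : Int) : Prop := 0 ≤ n
instance (n : Int) : Decidable (Pre_max_indexing n) := by unfold Pre_max_indexing; infer_instance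

def pvWitness_max_indexing : Int := 907

def Spec_max_indexing (n : Int) (out : Int × Int) : Prop := out = max_indexing_alt n
instance (n : Int) (out : Int × Int) : Decidable (Spec_max_indexing n out) := by unfold Spec_max_indexing; infer_instance

-- ===== CLAIM (what is proved, stated in full; the proofs are below) =====
def Claim_equal_max_indexing : Prop := ∀ (n : Int), Dom_max_indexing n → Pre_max_indexing n → Spec_max_indexing n (max_indexing n)

-- ===== LEMMAS AND PROOFS =====

-- A's loop, expressed over the already-extracted digit list (same updates).
def scanA : List Int → Int → Int → Int → Int × Int
  | [], i, _, mdi => (mdi, i - 1 - mdi)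
  | d :: ds, i, md, mdi => if d > md then scanA ds (i + 1) d i else scanA ds (i + 1) md mdi

theorem loop_eq_scan_aux : ∀ (k : Nat) (n i md mdi : Int), n.toNat < k →
    maxILoop n i md mdi = scanA (pyDigits n) i md mdi := by
  intro k
  induction k with
  | zero => intro n i md mdi h; omega
  | succ k ih =>
      intro n i md mdi h
      by_cases hn : 0 < n
      · have hlt := pvFloordivTen_lt n hn
        rw [maxILoop, pyDigits]
        simp only [dif_pos hn, scanA]
        by_cases hgt : PySem.Int.mod n 10 > md
        · rw [if_pos hgt, if_pos hgt]; exact ih _ _ _ _ (by omega)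
        · rw [if_neg hgt, if_neg hgt]; exact ih _ _ _ _ (by omega)
      · rw [maxILoop, pyDigits]
        simp [dif_neg hn, scanA]

theorem loop_eq_scan (n i md mdi : Int) :
    maxILoop n i md mdi = scanA (pyDigits n) i md mdi :=
  loop_eq_scan_aux (n.toNat + 1) n i md mdi (by omega)

theorem scan_all_le (xs : List Int) : ∀ (i md mdi : Int), (∀ x ∈ xs, x ≤ md) →
    scanA xs i md mdi = (mdi, i + (xs.length : Int) - 1 - mdi) := by
  induction xs with
  | nil => intro i md mdi _; simp [scanA]
  | cons d ds ih =>
      intro i md mdi h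
      have hd : ¬ d > md := by have := h d (by simp); omega
      rw [scanA, if_neg hd, ih (i + 1) md mdi (fun x hx => h x (by simp [hx]))]
      simp only [List.length_cons, Prod.mk.injEq]
      exact ⟨trivial, by push_cast; ring⟩

theorem scan_gt (xs : List Int) : ∀ (m : Int) (j : Nat) (i md mdi : Int),
    (∀ y ∈ xs, y ≤ m) → PySem.List.index? xs m = some j → md < m →
    scanA xs i md mdi = (i + (j : Int), i + (xs.length : Int) - 1 - (i + (j : Int))) := by
  induction xs with
  | nil => intro m j i md mdi _ hidx _; simp [PySem.List.index?_eq_idxOf?, List.idxOf?] at hidx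
  | cons d ds ih =>
      intro m j i md mdi hle hidx hmd
      by_cases hd : d = m
      · subst hd
        rw [PySem.List.index?_cons_self] at hidx
        have hj0 : j = 0 := by injection hidx with h'; omega
        subst hj0
        rw [scanA, if_pos hmd,
          scan_all_le ds (i + 1) d i (fun x hx => hle x (by simp [hx]))]
        simp only [List.length_cons, Prod.mk.injEq]
        push_cast
        constructor <;> ring
      · rw [PySem.List.index?_cons_of_ne _ hd] at hidx
        obtain ⟨j', hj', rfl⟩ : ∃ j', PySem.List.index? ds m = some j' ∧ j = j' + 1 := by
          cases hidx' : PySem.List.index? ds m <;> rw [hidx'] at hidx <;> simp_all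
        have hdm : d < m := lt_of_le_of_ne (hle d (by simp)) hd
        have htail : ∀ y ∈ ds, y ≤ m := fun y hy => hle y (by simp [hy])
        rw [scanA]
        by_cases hgt : d > md
        · rw [if_pos hgt, ih m j' (i + 1) d i htail hj' hdm]
          simp only [List.length_cons, Prod.mk.injEq]
          push_cast; constructor <;> ring
        · rw [if_neg hgt, ih m j' (i + 1) md mdi htail hj' hmd]
          simp only [List.length_cons, Prod.mk.injEq]
          push_cast; constructor <;> ring

theorem digits_has_pos (n : Int) (h : 0 < n) : ∃ d ∈ pyDigits n, 0 < d := by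
  induction n using pyDigits.induct with
  | case1 n hn ih =>
      by_cases hm : 0 < PySem.Int.mod n 10
      · exact ⟨_, by rw [pyDigits, dif_pos hn]; simp, hm⟩
      · have hmz : PySem.Int.mod n 10 = 0 := by
          have := PySem.Int.mod_nonneg (a := n) (b := 10) (by norm_num); omega
        have hdvd : (10 : Int) ∣ n := (PySem.Int.mod_eq_zero_iff_dvd n 10).1 hmz
        have h10 : (10 : Int) ≤ n := Int.le_of_dvd hn hdvd
        have hq : 0 < PySem.Int.floordiv n 10 :=
          (PySem.Int.le_floordiv_iff_mul_le (a := n) (b := 10) (q := 1) (by norm_num)).2 (by omega)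
        obtain ⟨d, hd, hdp⟩ := ih hq
        exact ⟨d, by rw [pyDigits, dif_pos hn]; exact List.mem_cons_of_mem _ hd, hdp⟩
  | case2 n hn => omega

-- ===== VERDICT (by name: the statement is the Claim_ definition above) =====
theorem max_indexing_spec : Claim_equal_max_indexing := by
  intro n _ hpre
  unfold Spec_max_indexing max_indexing
  rw [loop_eq_scan]
  by_cases hn : 0 < n
  · -- nonempty digit list
    have hne : pyDigits n ≠ [] := by rw [pyDigits, dif_pos hn]; simp
    obtain ⟨m, hm⟩ : ∃ m, PySem.List.max? (pyDigits n) (fun x => x) = some m := by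
      cases hmax : PySem.List.max? (pyDigits n) (fun x => x)
      · exact absurd ((PySem.List.max?_eq_none_iff _ _).1 hmax) hne
      · exact ⟨_, rfl⟩
    have hmem : m ∈ pyDigits n := PySem.List.max?_mem hm
    have hmax : ∀ y ∈ pyDigits n, y ≤ m := fun y hy => PySem.List.max?_isMax hm y hy
    obtain ⟨j, hj⟩ : ∃ j, PySem.List.index? (pyDigits n) m = some j := by
      cases hidx : PySem.List.index? (pyDigits n) m
      · have hs := (PySem.List.index?_isSome_iff (pyDigits n) m).2 hmem
        rw [hidx] at hs; exact absurd hs (by simp)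
      · exact ⟨_, rfl⟩
    have hmpos : 0 < m := by
      obtain ⟨d, hd, hdp⟩ := digits_has_pos n hn
      exact lt_of_lt_of_le hdp (hmax d hd)
    rw [scan_gt (pyDigits n) m j 0 0 0 hmax hj hmpos]
    unfold max_indexing_alt
    simp only [if_neg hne, hm, Option.getD_some, hj, Prod.mk.injEq]
    omega
  · -- n = 0: both sides return (0, -1)
    have hz : n = 0 := by unfold Pre_max_indexing at hpre; omega
    subst hz
    have hd0 : pyDigits 0 = [] := by rw [pyDigits]; simp
    unfold max_indexing_alt
    rw [hd0]
    simp [scanA]
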